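-- pv_equiv track=rewrite | github.com/itsgopeshr/PreMock_Python_Project | Project_Library_Mgmt/LOGIC/logic.py | calculate_fine
-- ===== SOURCE A (Python) =====
-- import math
--
-- def calculate_fine(days_overdue):
--     if days_overdue <= 0:
--         return 0
--
--     fine = 0
--     for day in range(1, days_overdue + 1):
--         week_number = ((day - 1) // 7) + 1
--         daily_rate = 10 * math.factorial(week_number)
--         fine += daily_rate
--     return fine
-- ===== SOURCE B (Python) =====
-- def calculate_fine(days_overdue):
--     # One pass per WEEK: keep the weekly factorial incrementally and
--     # multiply by the number of days charged in that week.
--     if days_overdue <= 0: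
--         return 0
--     fine = 0
--     fact = 1
--     week = 0
--     remaining = days_overdue
--     while remaining > 0:
--         week += 1
--         fact *= week
--         d = min(7, remaining)
--         fine += 10 * fact * d
--         remaining -= d
--     return fine
-- ===== Notes on version B (the rewrite author's own statement) =====
-- stated objective: faster
-- what changed: Replaces the per-day loop that recomputes math.factorial(week) for every day with a per-week loop that maintains the factorial incrementally and adds rate·factorial·days-in-week once per week.
import Mathlib
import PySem

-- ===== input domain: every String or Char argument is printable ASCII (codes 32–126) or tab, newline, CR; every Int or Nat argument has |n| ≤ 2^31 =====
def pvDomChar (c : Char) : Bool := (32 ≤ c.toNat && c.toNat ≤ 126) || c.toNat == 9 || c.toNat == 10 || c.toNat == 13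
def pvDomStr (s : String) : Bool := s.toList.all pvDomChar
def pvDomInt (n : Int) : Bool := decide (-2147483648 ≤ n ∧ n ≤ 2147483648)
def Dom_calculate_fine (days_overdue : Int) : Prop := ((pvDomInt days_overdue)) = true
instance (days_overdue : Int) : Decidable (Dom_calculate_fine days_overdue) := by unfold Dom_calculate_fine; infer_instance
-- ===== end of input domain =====

-- B replaces A's per-day loop (factorial recomputed every day) by a per-week loop with an
-- incrementally maintained factorial; faster in a timing run (asymptotic mechanism).

-- ===== PORT A =====
-- math.factorial; exact for nonnegative arguments (A only ever calls it with week_number ≥ 1)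
def pyFactorial (k : Int) : Int := (Nat.factorial k.toNat : Int)

def calculate_fine (days_overdue : Int) : Int :=
  if days_overdue ≤ 0 then 0
  else
    (PySem.List.pyRange 1 (days_overdue + 1) 1).foldl
      (fun fine day =>
        let week_number := PySem.Int.floordiv (day - 1) 7 + 1
        let daily_rate := 10 * pyFactorial week_number
        fine + daily_rate) 0

-- ===== PORT B =====
-- the while loop of Source B; `remaining` is tracked as the Nat fuel (it starts positive and decreases)
def fineLoop (remaining : Nat) (week fact fine : Int) : Int :=
  if h : remaining = 0 then fine
  else
    let week' := week + 1
    let fact' := fact * week'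
    let d := min 7 remaining
    fineLoop (remaining - d) week' fact' (fine + 10 * fact' * (d : Int))
termination_by remaining
decreasing_by omega

def calculate_fine_alt (days_overdue : Int) : Int :=
  if days_overdue ≤ 0 then 0
  else fineLoop days_overdue.toNat 0 1 0

-- ===== PRECONDITION & SPEC =====
def Spec_calculate_fine (days_overdue : Int) (out : Int) : Prop := out = calculate_fine_alt days_overdue
instance (days_overdue : Int) (out : Int) : Decidable (Spec_calculate_fine days_overdue out) := by unfold Spec_calculate_fine; infer_instance

-- ===== CLAIM (what is proved, stated in full; the proofs are below) =====
def Claim_equal_calculate_fine : Prop := ∀ (days_overdue : Int), Dom_calculate_fine days_overdue → Spec_calculate_fine days_overdue (calculate_fine days_overdue)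

-- ===== LEMMAS AND PROOFS =====

-- common closed form: total fine for r days starting after `w` completed weeks
def fineSum (r w : Nat) : Int :=
  ∑ i ∈ Finset.range r, 10 * (Nat.factorial (i / 7 + w + 1) : Int)

lemma fineSum_step (r w : Nat) (hr : r ≠ 0) :
    fineSum r w = 10 * (Nat.factorial (w + 1) : Int) * ((min 7 r : Nat) : Int) + fineSum (r - min 7 r) (w + 1) := by
  rcases le_or_gt r 7 with h | h
  · have hmin : min 7 r = r := by omega
    rw [hmin]
    have h1 : fineSum r w = ∑ _i ∈ Finset.range r, 10 * (Nat.factorial (w + 1) : Int) := by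
      unfold fineSum
      refine Finset.sum_congr rfl fun i hi => ?_
      have h0 : i / 7 = 0 := Nat.div_eq_of_lt (by simp at hi; omega)
      simp [h0]
    rw [h1, Finset.sum_const]
    simp [fineSum]
    ring
  · have hmin : min 7 r = 7 := by omega
    rw [hmin]
    obtain ⟨s, rfl⟩ : ∃ s, r = 7 + s := ⟨r - 7, by omega⟩
    have hsub : 7 + s - 7 = s := by omega
    rw [hsub]
    unfold fineSum
    rw [Finset.sum_range_add]
    congr 1
    · have hc : ∀ i ∈ Finset.range 7, 10 * (Nat.factorial (i / 7 + w + 1) : Int)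
          = 10 * (Nat.factorial (w + 1) : Int) := by
        intro i hi
        have h0 : i / 7 = 0 := Nat.div_eq_of_lt (by simp at hi; omega)
        simp [h0]
      rw [Finset.sum_congr rfl hc, Finset.sum_const]
      simp; ring
    · refine Finset.sum_congr rfl fun i _ => ?_
      have h7 : (7 + i) / 7 = i / 7 + 1 := by omega
      have h8 : i / 7 + 1 + w + 1 = i / 7 + (w + 1) + 1 := by omega
      rw [h7, h8]

lemma fineLoop_eq (r : Nat) : ∀ (w : Nat) (fine : Int),
    fineLoop r (w : Int) (Nat.factorial w : Int) fine = fine + fineSum r w := by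
  induction r using Nat.strong_induction_on with
  | _ r ih =>
    intro w fine
    rw [fineLoop]
    by_cases hr : r = 0
    · simp [hr, fineSum]
    · simp only [hr, dif_neg, not_false_iff]
      have hcast : ((w : Int) + 1) = ((w + 1 : Nat) : Int) := by push_cast; ring
      have hfact : (Nat.factorial w : Int) * ((w : Int) + 1) = (Nat.factorial (w + 1) : Int) := by
        rw [Nat.factorial_succ]; push_cast; ring
      rw [hfact, hcast, ih (r - min 7 r) (by omega) (w + 1)]
      rw [fineSum_step r w hr]
      push_cast
      ring

lemma sum_map_range (n : Nat) (f : Nat → Int) :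
    ((List.range n).map f).sum = ∑ i ∈ Finset.range n, f i := by
  induction n with
  | zero => simp
  | succ n ih => rw [List.range_succ, Finset.sum_range_succ, List.map_append]; simp [ih]

lemma portA_eq_fineSum (n : Int) (hn : 0 < n) :
    calculate_fine n = fineSum n.toNat 0 := by
  unfold calculate_fine
  rw [if_neg (by omega)]
  rw [PySem.List.foldl_add (g := fun day =>
        10 * pyFactorial (PySem.Int.floordiv (day - 1) 7 + 1))]
  rw [PySem.List.pyRange_one]
  have hlen : (n + 1 - 1).toNat = n.toNat := by omega
  rw [hlen, List.map_map, zero_add, sum_map_range]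
  unfold fineSum
  refine Finset.sum_congr rfl fun k _ => ?_
  have h1 : (1 : Int) + (k : Int) - 1 = ((k : Nat) : Int) := by ring
  have h3 : PySem.Int.floordiv ((k : Nat) : Int) 7 = ((k / 7 : Nat) : Int) := by
    exact_mod_cast PySem.Int.floordiv_natCast k 7
  simp only [Function.comp, h1, h3]
  unfold pyFactorial
  have h2 : (((k / 7 : Nat) : Int) + 1).toNat = k / 7 + 0 + 1 := by omega
  rw [h2]

-- ===== VERDICT (by name: the statement is the Claim_ definition above) =====
theorem calculate_fine_spec : Claim_equal_calculate_fine := by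
  intro n _
  unfold Spec_calculate_fine calculate_fine_alt
  by_cases hn : n ≤ 0
  · simp [hn, calculate_fine]
  · rw [if_neg hn]
    have hpos : 0 < n := by omega
    rw [portA_eq_fineSum n hpos]
    have := fineLoop_eq n.toNat 0 0
    simpa using this.symm
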